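-- pv_equiv track=rewrite | github.com/H1K0/HuffPress | huffman.py | shichiro_decode
-- ===== SOURCE A (Python) =====
-- def shichiro_decode(byts):
--     bits=''.join(byts)
--     dec = []
--     table = {}
--     stack = ''
--     i = 0
--     c = 0
--     while i < len(bits) and len(bits) - i >= 8:
--         if c % 2 == 0:
--             dec.append(bits[i:i+8])
--             i += 8
--             c += 1
--             continue
--         bitlen = ''
--         if bits[i] == '0':
--             bitlen = int(bits[i:i+8], 2)
--             i += 8
--         else:
--             while bits[i] == '1':
--                 bitlen += bits[i+1:i+8]
--                 i += 8
--             bitlen = int(bitlen + bits[i+8-int(bits[i+8:i+16], 2):i+8], 2)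
--             i += 16
--         dec.append(bits[i:i+bitlen])
--         i += bitlen
--         c += 1
--     for i in range(0, len(dec), 2):
--         table[dec[i + 1]] = int(dec[i], 2)
--     return table
-- ===== SOURCE B (Python) =====
-- def shichiro_decode(byts):
--     bits = ''.join(byts)
--     table = {}
--     while len(bits) >= 8:
--         val = int(bits[:8], 2)
--         bits = bits[8:]
--         if len(bits) < 8:
--             break
--         if bits[0] == '0':
--             bitlen = int(bits[:8], 2)
--             bits = bits[8:]
--         else:
--             acc = ''
--             while bits[0] == '1':
--                 acc += bits[1:8]
--                 bits = bits[8:]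
--             n = int(bits[8:16], 2)
--             bitlen = int(acc + bits[8 - n:8], 2)
--             bits = bits[16:]
--         table[bits[:bitlen]] = val
--         bits = bits[bitlen:]
--     return table
-- ===== Notes on version B (the rewrite author's own statement) =====
-- stated objective: simpler
-- what changed: B fuses A's two passes into one streaming pass that consumes the bit string from the front with slicing and inserts each (code, value) pair into the table as soon as it is parsed, dropping A's intermediate dec list and its second index-stepping dict-building loop.
import Mathlib
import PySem

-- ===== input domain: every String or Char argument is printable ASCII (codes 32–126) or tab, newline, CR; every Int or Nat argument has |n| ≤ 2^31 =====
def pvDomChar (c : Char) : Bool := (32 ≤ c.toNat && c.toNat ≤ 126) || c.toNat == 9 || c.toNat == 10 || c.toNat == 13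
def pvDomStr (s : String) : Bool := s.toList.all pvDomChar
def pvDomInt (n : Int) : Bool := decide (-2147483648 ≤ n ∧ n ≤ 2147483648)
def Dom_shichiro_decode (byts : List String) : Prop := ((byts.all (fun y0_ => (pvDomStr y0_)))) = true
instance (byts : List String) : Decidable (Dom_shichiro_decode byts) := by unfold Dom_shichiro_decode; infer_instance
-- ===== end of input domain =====

-- B fuses A's two passes (parse to a flat list, then a second indexed pass building the dict)
-- into one streaming pass that consumes the bit string from the front and fills the table
-- directly.  Equality of the RETURN value is proved on Pre_ (well-formed record streams).

-- ===== PORT A =====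
-- A's inner 'while bits[i] == "1"' loop (fuel makes the recursion structural; fuel is
-- always called with bits.length + 1, enough since i grows by 8 while i < len(bits)).
def pvAwhile (bits : List Char) : Nat → Nat → List Char → Option (Nat × List Char)
  | 0, _, _ => none
  | fuel + 1, p, acc =>
    match bits[p]? with
    | none => none            -- IndexError (outside Pre_)
    | some c =>
      if c = '1' then
        pvAwhile bits fuel (p + 8)
          (acc ++ PySem.List.slice bits (some ((p : Int) + 1)) (some ((p : Int) + 8)))
      else some (p, acc)

-- A's main while loop; state (i, c, dec) exactly as in the Python; none = Python raises.
def pvAloop (bits : List Char) : Nat → Nat → Nat → List (List Char) → Option (List (List Char))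
  | 0, _, _, _ => none
  | fuel + 1, i, c, dec =>
    if 8 ≤ bits.length - i then
      if c % 2 = 0 then
        pvAloop bits fuel (i + 8) (c + 1)
          (dec ++ [PySem.List.slice bits (some (i : Int)) (some ((i : Int) + 8))])
      else if bits.getD i ' ' = '0' then   -- bits[i]; in range since len(bits) - i ≥ 8
        match PySem.Int.ofCharsBase? (PySem.List.slice bits (some (i : Int)) (some ((i : Int) + 8))) 2 with
        | none => none        -- ValueError (outside Pre_)
        | some bl =>
          pvAloop bits fuel (i + 8 + bl.toNat) (c + 1)
            (dec ++ [PySem.List.slice bits (some ((i : Int) + 8)) (some ((i : Int) + 8 + bl))])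
      else
        match pvAwhile bits (bits.length + 1) i [] with
        | none => none
        | some (q, acc) =>
          match PySem.Int.ofCharsBase? (PySem.List.slice bits (some ((q : Int) + 8)) (some ((q : Int) + 16))) 2 with
          | none => none
          | some n =>
            match PySem.Int.ofCharsBase? (acc ++ PySem.List.slice bits (some ((q : Int) + 8 - n)) (some ((q : Int) + 8))) 2 with
            | none => none
            | some bl =>
              pvAloop bits fuel (q + 16 + bl.toNat) (c + 1)
                (dec ++ [PySem.List.slice bits (some ((q : Int) + 16)) (some ((q : Int) + 16 + bl))])
    else some dec

-- A's final 'for i in range(0, len(dec), 2)' loop building the dict.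
def pvAconv (dec : List (List Char)) : Nat → Nat → PySem.Dict String Int → Option (PySem.Dict String Int)
  | 0, _, _ => none
  | fuel + 1, i, table =>
    if i < dec.length then
      match dec[i + 1]? with
      | none => none          -- IndexError (outside Pre_)
      | some code =>
        match PySem.Int.ofCharsBase? (dec.getD i []) 2 with
        | none => none        -- ValueError (outside Pre_)
        | some v => pvAconv dec fuel (i + 2) (table.insert (String.ofList code) v)
    else some table

def shichiro_decode (byts : List String) : List (String × Int) :=
  let bits := (byts.map String.toList).flatten   -- ''.join(byts): concatenation (exact)
  match pvAloop bits (bits.length + 1) 0 0 [] with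
  | none => []                -- Python raises here (outside Pre_)
  | some dec =>
    match pvAconv dec (dec.length + 1) 0 PySem.Dict.empty with
    | none => []              -- Python raises here (outside Pre_)
    | some table => table.items

-- ===== PORT B =====
-- B's inner "while bits[0] == '1'" loop on the remaining stream (consumed from the front).
def pvBwhile : Nat → List Char → List Char → Option (List Char × List Char)
  | 0, _, _ => none
  | fuel + 1, rem, acc =>
    match rem[0]? with
    | none => none            -- IndexError (outside Pre_)
    | some c =>
      if c = '1' then
        pvBwhile fuel (rem.drop 8) (acc ++ PySem.List.slice rem (some 1) (some 8))
      else some (rem, acc)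

-- B's single streaming loop: parse a record off the front, insert it, repeat.
-- Where the Python raises (outside Pre_) the port returns the table built so far.
def pvBloop : Nat → List Char → PySem.Dict String Int → PySem.Dict String Int
  | 0, _, table => table
  | fuel + 1, rem, table =>
    if 8 ≤ rem.length then
      match PySem.Int.ofCharsBase? (rem.take 8) 2 with
      | none => table
      | some v =>
        if (rem.drop 8).length < 8 then table    -- incomplete trailing record: break
        else if (rem.drop 8).getD 0 ' ' = '0' then   -- bits[0]; the remainder is nonempty here
          match PySem.Int.ofCharsBase? ((rem.drop 8).take 8) 2 with
          | none => table
          | some bl =>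
            pvBloop fuel (PySem.List.slice ((rem.drop 8).drop 8) (some bl) none)
              (table.insert (String.ofList (PySem.List.slice ((rem.drop 8).drop 8) none (some bl))) v)
        else
          match pvBwhile ((rem.drop 8).length + 1) (rem.drop 8) [] with
          | none => table
          | some (rem', acc) =>
            match PySem.Int.ofCharsBase? (PySem.List.slice rem' (some 8) (some 16)) 2 with
            | none => table
            | some n =>
              match PySem.Int.ofCharsBase? (acc ++ PySem.List.slice rem' (some (8 - n)) (some 8)) 2 with
              | none => table
              | some bl =>
                pvBloop fuel (PySem.List.slice (rem'.drop 16) (some bl) none)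
                  (table.insert (String.ofList (PySem.List.slice (rem'.drop 16) none (some bl))) v)
    else table

def shichiro_decode_alt (byts : List String) : List (String × Int) :=
  let bits := (byts.map String.toList).flatten   -- ''.join(byts): concatenation (exact)
  (pvBloop (bits.length + 1) bits PySem.Dict.empty).items

-- ===== PRECONDITION & SPEC =====
-- Pre_ is the FORMAT of the stream (the record grammar of HuffPress's header), stated as a
-- recursive-descent grammar over the input, not a copy of either port: A walks the joined
-- string by an index with a parity counter and a second dict-building pass, B consumes the
-- string with slicing and builds the dict inline; the grammar below only describes the record
-- SHAPE.  The fuel argument merely makes the recursion structural (length + 1 always suffices).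
-- pvHdr: the bitlen header of one code: blocks of 8 starting with '1' (7 payload bits each),
-- then a terminal block: an 8-bit tail-length n (required in 0..8) and n tail bits.  Returns
-- (number of chars consumed + 16, code length ≥ 0).
def pvHdr : Nat → List Char → List Char → Option (Nat × Int)
  | 0, _, _ => none
  | fuel + 1, l, acc =>
    match l[0]? with
    | none => none
    | some c =>
      if c = '1' then
        (pvHdr fuel (l.drop 8) (acc ++ (l.drop 1).take 7)).map (fun r => (r.1 + 8, r.2))
      else
        match PySem.Int.ofCharsBase? ((l.drop 8).take 8) 2 with
        | none => none
        | some n =>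
          if n < 0 ∨ 8 < n then none     -- malformed header: A's value is a slice-wrap accident
          else
            match PySem.Int.ofCharsBase? (acc ++ (l.drop (8 - n.toNat)).take n.toNat) 2 with
            | none => none
            | some bl =>
              if bl < 0 then none        -- malformed header: A's value is a slice-wrap accident
              else some (16, bl)

-- One code field: either a single 8-bit length block starting '0', or a multi-block header.
def pvCode (l : List Char) : Option (Nat × Int) :=
  match l[0]? with
  | none => none
  | some c =>
    if c = '0' then
      match PySem.Int.ofCharsBase? (l.take 8) 2 with
      | none => none
      | some bl => if bl < 0 then none else some (8, bl)
    else pvHdr (l.length + 1) l []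

-- The stream is a sequence of records (8-char binary value, code field, code chars); up to 7
-- trailing junk chars are ignored (as A ignores them).  Returns the records.
def pvRecords : Nat → List Char → Option (List (List Char × List Char × Int))
  | 0, _ => none
  | fuel + 1, l =>
    if l.length < 8 then some []
    else
      match PySem.Int.ofCharsBase? (l.take 8) 2 with
      | none => none
      | some v =>
        if (l.drop 8).length < 8 then none    -- value without a code field: A raises IndexError
        else
          match pvCode (l.drop 8) with
          | none => none
          | some (skip, bl) =>
            match pvRecords fuel (l.drop (8 + skip + bl.toNat)) with
            | none => none
            | some rs => some ((l.take 8, (l.drop (8 + skip)).take bl.toNat, v) :: rs)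

-- Pre_ admits exactly the well-formed record streams.  On other inputs A raises
-- (IndexError/ValueError) — except malformed headers whose length field parses outside 0..8 or
-- whose code length parses negative: there A still returns, but its table is an accident of
-- Python negative-slice wraparound over the WHOLE stream (B slices the remaining stream), so
-- those corner inputs are excluded too.
def Pre_shichiro_decode (byts : List String) : Prop :=
  (pvRecords (((byts.map String.toList).flatten).length + 1) ((byts.map String.toList).flatten)).isSome = true

instance (byts : List String) : Decidable (Pre_shichiro_decode byts) := by
  unfold Pre_shichiro_decode; infer_instance

def pvWitness_shichiro_decode : List String := ["0000000100000010", "11"]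

def Spec_shichiro_decode (byts : List String) (out : List (String × Int)) : Prop := out = shichiro_decode_alt byts
instance (byts : List String) (out : List (String × Int)) : Decidable (Spec_shichiro_decode byts out) := by unfold Spec_shichiro_decode; infer_instance

-- ===== CLAIM (what is proved, stated in full; the proofs are below) =====
def Claim_equal_shichiro_decode : Prop := ∀ (byts : List String), Dom_shichiro_decode byts → Pre_shichiro_decode byts → Spec_shichiro_decode byts (shichiro_decode byts)

-- ===== LEMMAS AND PROOFS =====

-- record list -> the flat dec list A accumulates
def pvFlat (rs : List (List Char × List Char × Int)) : List (List Char) :=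
  rs.flatMap (fun r => [r.1, r.2.1])

-- record list -> the table fold both programs perform
def pvIns (t : PySem.Dict String Int) (r : List Char × List Char × Int) : PySem.Dict String Int :=
  t.insert (String.ofList r.2.1) r.2.2

theorem pv_dd (xs : List Char) (a b : Nat) : (xs.drop a).drop b = xs.drop (a + b) := by
  rw [List.drop_drop]

theorem pv_lt_of_get {l : List Char} {n : Nat} {c : Char} (h : l[n]? = some c) : n < l.length := by
  obtain ⟨h1, -⟩ := List.getElem?_eq_some_iff.mp h
  exact h1

theorem pv_get0_drop {l : List Char} {p : Nat} {c : Char} (h : (l.drop p)[0]? = some c) :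
    l[p]? = some c := by
  rw [List.getElem?_drop] at h
  simpa using h

theorem pv_seg (xs : List Char) (a b : Int) (p k : Nat) (ha : a = (p : Int))
    (hb : b = (p : Int) + (k : Int)) :
    PySem.List.slice xs (some a) (some b) = (xs.drop p).take k := by
  subst ha hb
  rw [PySem.List.slice_toNat xs (by omega) (by omega)]
  have h2 : ((p : Int) + (k : Int)).toNat - ((p : Int)).toNat = k := by omega
  have h1 : ((p : Int)).toNat = p := by omega
  rw [h2, h1]

theorem pv_la_hdr (bits : List Char) :
    ∀ (fuel1 fuel2 p : Nat) (acc : List Char) (skip : Nat) (bl : Int),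
      bits.length - p < fuel1 → bits.length - p < fuel2 →
      pvHdr fuel1 (bits.drop p) acc = some (skip, bl) →
      ∃ (q : Nat) (a : List Char) (n : Int),
        pvAwhile bits fuel2 p acc = some (q, a) ∧
        q + 16 = p + skip ∧ 16 ≤ skip ∧
        PySem.Int.ofCharsBase? (((bits.drop q).drop 8).take 8) 2 = some n ∧
        0 ≤ n ∧ n ≤ 8 ∧
        PySem.Int.ofCharsBase? (a ++ ((bits.drop q).drop (8 - n.toNat)).take n.toNat) 2 = some bl ∧
        0 ≤ bl := by
  intro fuel1
  induction fuel1 with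
  | zero => intro fuel2 p acc skip bl h1; omega
  | succ f ih =>
    intro fuel2 p acc skip bl h1 h2 hH
    obtain _ | f2 := fuel2
    · omega
    simp only [pvHdr] at hH
    cases hl0 : (bits.drop p)[0]? with
    | none => rw [hl0] at hH; simp at hH
    | some c =>
      simp only [hl0] at hH
      have hp : p < bits.length := by
        have h := pv_lt_of_get hl0
        simp only [List.length_drop] at h
        omega
      have hl0' : bits[p]? = some c := pv_get0_drop hl0
      by_cases hc : c = '1'
      · rw [if_pos hc] at hH
        obtain ⟨⟨skip', bl'⟩, hrec, heq⟩ := Option.map_eq_some_iff.mp hH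
        simp only [Prod.mk.injEq] at heq
        obtain ⟨hsk, hbl'⟩ := heq
        rw [pv_dd bits p 8, pv_dd bits p 1, hbl'] at hrec
        obtain ⟨q, a, n, hW, hq, hsk16, hn, hn0, hn8, hblp, hbl0⟩ :=
          ih f2 (p + 8) (acc ++ (bits.drop (p + 1)).take 7) skip' bl
            (by omega) (by omega) hrec
        refine ⟨q, a, n, ?_, by omega, by omega, hn, hn0, hn8, hblp, hbl0⟩
        simp only [pvAwhile, hl0']
        rw [if_pos hc]
        rw [pv_seg bits ((p : Int) + 1) ((p : Int) + 8) (p + 1) 7 (by push_cast; ring)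
          (by push_cast; ring)]
        exact hW
      · rw [if_neg hc] at hH
        cases hn : PySem.Int.ofCharsBase? (((bits.drop p).drop 8).take 8) 2 with
        | none => rw [hn] at hH; simp at hH
        | some n =>
          simp only [hn] at hH
          by_cases hnr : n < 0 ∨ 8 < n
          · rw [if_pos hnr] at hH; simp at hH
          rw [if_neg hnr] at hH
          cases hbl : PySem.Int.ofCharsBase? (acc ++ ((bits.drop p).drop (8 - n.toNat)).take n.toNat) 2 with
          | none => rw [hbl] at hH; simp at hH
          | some bl' =>
            simp only [hbl] at hH
            by_cases hblr : bl' < 0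
            · rw [if_pos hblr] at hH; simp at hH
            rw [if_neg hblr] at hH
            simp only [Option.some.injEq, Prod.mk.injEq] at hH
            obtain ⟨hsk, hble⟩ := hH
            refine ⟨p, acc, n, ?_, by omega, by omega, hn, by omega, by omega, ?_, by omega⟩
            · simp only [pvAwhile, hl0']
              rw [if_neg hc]
            · rw [hble] at hbl; exact hbl

theorem pv_lb_hdr :
    ∀ (fuel1 fuel2 : Nat) (l acc : List Char) (skip : Nat) (bl : Int),
      l.length < fuel1 → l.length < fuel2 →
      pvHdr fuel1 l acc = some (skip, bl) →
      ∃ (a : List Char) (n : Int),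
        pvBwhile fuel2 l acc = some (l.drop (skip - 16), a) ∧ 16 ≤ skip ∧
        PySem.Int.ofCharsBase? (((l.drop (skip - 16)).drop 8).take 8) 2 = some n ∧
        0 ≤ n ∧ n ≤ 8 ∧
        PySem.Int.ofCharsBase? (a ++ ((l.drop (skip - 16)).drop (8 - n.toNat)).take n.toNat) 2 = some bl ∧
        0 ≤ bl := by
  intro fuel1
  induction fuel1 with
  | zero => intro fuel2 l acc skip bl h1; omega
  | succ f ih =>
    intro fuel2 l acc skip bl h1 h2 hH
    obtain _ | f2 := fuel2
    · omega
    simp only [pvHdr] at hH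
    cases hl0 : l[0]? with
    | none => rw [hl0] at hH; simp at hH
    | some c =>
      simp only [hl0] at hH
      have hp : 0 < l.length := pv_lt_of_get hl0
      by_cases hc : c = '1'
      · rw [if_pos hc] at hH
        obtain ⟨⟨skip', bl'⟩, hrec, heq⟩ := Option.map_eq_some_iff.mp hH
        simp only [Prod.mk.injEq] at heq
        obtain ⟨hsk, hbl'⟩ := heq
        rw [hbl'] at hrec
        obtain ⟨a, n, hW, hsk16, hn, hn0, hn8, hblp, hbl0⟩ :=
          ih f2 (l.drop 8) (acc ++ (l.drop 1).take 7) skip' bl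
            (by simp only [List.length_drop]; omega)
            (by simp only [List.length_drop]; omega)
            hrec
        have hdr : (l.drop 8).drop (skip' - 16) = l.drop (skip - 16) := by
          rw [pv_dd]
          congr 1
          omega
        refine ⟨a, n, ?_, by omega, ?_, hn0, hn8, ?_, hbl0⟩
        · simp only [pvBwhile, hl0]
          rw [if_pos hc]
          rw [pv_seg l 1 8 1 7 (by norm_num) (by norm_num)]
          rw [← hdr]
          exact hW
        · rw [← hdr]; exact hn
        · rw [← hdr]; exact hblp
      · rw [if_neg hc] at hH
        cases hn : PySem.Int.ofCharsBase? ((l.drop 8).take 8) 2 with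
        | none => rw [hn] at hH; simp at hH
        | some n =>
          simp only [hn] at hH
          by_cases hnr : n < 0 ∨ 8 < n
          · rw [if_pos hnr] at hH; simp at hH
          rw [if_neg hnr] at hH
          cases hbl : PySem.Int.ofCharsBase? (acc ++ (l.drop (8 - n.toNat)).take n.toNat) 2 with
          | none => rw [hbl] at hH; simp at hH
          | some bl' =>
            simp only [hbl] at hH
            by_cases hblr : bl' < 0
            · rw [if_pos hblr] at hH; simp at hH
            rw [if_neg hblr] at hH
            simp only [Option.some.injEq, Prod.mk.injEq] at hH
            obtain ⟨hsk, hble⟩ := hH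
            refine ⟨acc, n, ?_, by omega, ?_, by omega, by omega, ?_, by omega⟩
            · simp only [pvBwhile, hl0]
              rw [if_neg hc, show skip - 16 = 0 by omega]
              simp
            · rw [show skip - 16 = 0 by omega]
              simpa using hn
            · rw [show skip - 16 = 0 by omega]
              simp only [List.drop_zero]
              rw [hble] at hbl; exact hbl

theorem pv_records_congr :
    ∀ (fuel fuel' : Nat) (l : List Char), l.length < fuel → l.length < fuel' →
      pvRecords fuel l = pvRecords fuel' l := by
  intro fuel
  induction fuel with
  | zero => intro fuel' l h1; omega
  | succ f ih =>
    intro fuel' l h1 h2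
    obtain _ | f2 := fuel'
    · omega
    simp only [pvRecords]
    by_cases h8 : l.length < 8
    · rw [if_pos h8, if_pos h8]
    rw [if_neg h8, if_neg h8]
    cases hv : PySem.Int.ofCharsBase? (l.take 8) 2 with
    | none => rfl
    | some v =>
      simp only
      by_cases h88 : (l.drop 8).length < 8
      · rw [if_pos h88, if_pos h88]
      rw [if_neg h88, if_neg h88]
      cases hcp : pvCode (l.drop 8) with
      | none => rfl
      | some sb =>
        obtain ⟨skip, bl⟩ := sb
        simp only
        rw [ih f2 (l.drop (8 + skip + bl.toNat)) (by simp only [List.length_drop]; omega)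
          (by simp only [List.length_drop]; omega)]

theorem pv_la (bits : List Char) :
    ∀ (fuel i c : Nat) (dec : List (List Char)) (rs : List (List Char × List Char × Int)),
      bits.length - i < fuel → c % 2 = 0 →
      pvRecords ((bits.drop i).length + 1) (bits.drop i) = some rs →
      pvAloop bits fuel i c dec = some (dec ++ pvFlat rs) := by
  intro fuel
  induction fuel using Nat.strong_induction_on with
  | _ fuel ih =>
  intro i c dec rs hf hc hrec
  obtain _ | f := fuel
  · omega
  simp only [pvRecords] at hrec
  have hld : (bits.drop i).length = bits.length - i := List.length_drop ..
  by_cases h8 : (bits.drop i).length < 8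
  · rw [if_pos h8] at hrec
    simp only [Option.some.injEq] at hrec
    simp only [pvAloop]
    rw [if_neg (show ¬ 8 ≤ bits.length - i by omega), ← hrec]
    simp [pvFlat]
  rw [if_neg h8] at hrec
  cases hv : PySem.Int.ofCharsBase? ((bits.drop i).take 8) 2 with
  | none => rw [hv] at hrec; simp at hrec
  | some v =>
    simp only [hv] at hrec
    by_cases h88 : ((bits.drop i).drop 8).length < 8
    · rw [if_pos h88] at hrec; simp at hrec
    rw [if_neg h88] at hrec
    have h88' : (bits.drop i).length - 8 = bits.length - (i + 8) := by omega
    cases hcp : pvCode ((bits.drop i).drop 8) with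
    | none => rw [hcp] at hrec; simp at hrec
    | some sb =>
      obtain ⟨skip, bl⟩ := sb
      simp only [hcp] at hrec
      cases hrest : pvRecords (bits.drop i).length ((bits.drop i).drop (8 + skip + bl.toNat)) with
      | none => rw [hrest] at hrec; simp at hrec
      | some rs' =>
        simp only [hrest, Option.some.injEq] at hrec
        rw [pv_dd] at hrest
        have hrest' : pvRecords ((bits.drop (i + (8 + skip + bl.toNat))).length + 1)
            (bits.drop (i + (8 + skip + bl.toNat))) = some rs' := by
          rw [← pv_records_congr (bits.drop i).length _ _
            (by simp only [List.length_drop]; omega) (by omega)]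
          exact hrest
        obtain _ | f' := f
        · omega
        simp only [pvAloop]
        rw [if_pos (show 8 ≤ bits.length - i by omega)]
        rw [if_pos hc]
        rw [if_pos (show 8 ≤ bits.length - (i + 8) by
          simp only [List.length_drop] at h88; omega)]
        rw [if_neg (show ¬ (c + 1) % 2 = 0 by omega)]
        rw [pv_seg bits ((i : Int)) ((i : Int) + 8) i 8 (by ring) (by push_cast; ring)]
        unfold pvCode at hcp
        cases hl10 : ((bits.drop i).drop 8)[0]? with
        | none => rw [hl10] at hcp; simp at hcp
        | some c0 =>
          simp only [hl10] at hcp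
          have hl10' : bits[i + 8]? = some c0 := by
            rw [pv_dd] at hl10
            exact pv_get0_drop hl10
          have hgetd : bits.getD (i + 8) ' ' = c0 := by
            rw [List.getD_eq_getElem?_getD, hl10']; rfl
          by_cases hc0 : c0 = '0'
          · -- single-block length
            rw [if_pos hc0] at hcp
            cases hbl : PySem.Int.ofCharsBase? (((bits.drop i).drop 8).take 8) 2 with
            | none => rw [hbl] at hcp; simp at hcp
            | some bl0 =>
              simp only [hbl] at hcp
              by_cases hblr : bl0 < 0
              · rw [if_pos hblr] at hcp; simp at hcp
              rw [if_neg hblr] at hcp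
              simp only [Option.some.injEq, Prod.mk.injEq] at hcp
              obtain ⟨hsk, hbl0⟩ := hcp
              rw [hgetd, if_pos hc0]
              rw [pv_seg bits (((i + 8 : Nat) : Int)) (((i + 8 : Nat) : Int) + 8) (i + 8) 8
                (by push_cast; ring) (by push_cast; ring)]
              rw [← pv_dd bits i 8]
              simp only [hbl]
              rw [pv_seg bits (((i + 8 : Nat) : Int) + 8) (((i + 8 : Nat) : Int) + 8 + bl0)
                (i + 16) bl0.toNat (by push_cast; omega) (by push_cast; omega)]
              rw [ih f' (by omega) (i + 8 + 8 + bl0.toNat) (c + 1 + 1)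
                (dec ++ [(bits.drop i).take 8] ++ [(bits.drop (i + 16)).take bl0.toNat]) rs'
                (by omega) (by omega)
                (by rw [show i + 8 + 8 + bl0.toNat = i + (8 + skip + bl.toNat) by omega]
                    exact hrest')]
              rw [← hrec]
              rw [show bl.toNat = bl0.toNat by omega, pv_dd bits i (8 + skip),
                show i + (8 + skip) = i + 16 by omega]
              simp [pvFlat, List.append_assoc]
          · -- multi-block header
            rw [if_neg hc0] at hcp
            obtain ⟨q, a, n, hW, hq16, hsk16, hn, hn0, hn8, hblp, hbl0⟩ :=
              pv_la_hdr bits (((bits.drop i).drop 8).length + 1) (bits.length + 1) (i + 8) []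
                skip bl (by simp only [List.length_drop]; omega) (by omega)
                (by rw [← pv_dd bits i 8]; exact hcp)
            rw [hgetd, if_neg hc0]
            simp only [hW]
            rw [pv_seg bits ((q : Int) + 8) ((q : Int) + 16) (q + 8) 8 (by push_cast; ring)
              (by push_cast; ring)]
            rw [← pv_dd bits q 8]
            simp only [hn]
            rw [pv_seg bits ((q : Int) + 8 - n) ((q : Int) + 8) (q + (8 - n.toNat)) n.toNat
              (by push_cast; omega) (by push_cast; omega)]
            rw [← pv_dd bits q (8 - n.toNat)]
            simp only [hblp]
            rw [pv_seg bits ((q : Int) + 16) ((q : Int) + 16 + bl) (q + 16) bl.toNat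
              (by push_cast; ring) (by push_cast; omega)]
            rw [ih f' (by omega) (q + 16 + bl.toNat) (c + 1 + 1)
              (dec ++ [(bits.drop i).take 8] ++ [(bits.drop (q + 16)).take bl.toNat]) rs'
              (by omega) (by omega)
              (by rw [show q + 16 + bl.toNat = i + (8 + skip + bl.toNat) by omega]
                  exact hrest')]
            rw [← hrec]
            rw [pv_dd bits i (8 + skip), show i + (8 + skip) = q + 16 by omega]
            simp [pvFlat, List.append_assoc]

theorem pv_lb :
    ∀ (fuel : Nat) (rem : List Char) (table : PySem.Dict String Int)
      (rs : List (List Char × List Char × Int)),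
      rem.length < fuel →
      pvRecords (rem.length + 1) rem = some rs →
      pvBloop fuel rem table = rs.foldl pvIns table := by
  intro fuel
  induction fuel with
  | zero => intro rem table rs h1; omega
  | succ f ih =>
    intro rem table rs hf hrec
    simp only [pvRecords] at hrec
    by_cases h8 : rem.length < 8
    · rw [if_pos h8] at hrec
      simp only [Option.some.injEq] at hrec
      simp only [pvBloop]
      rw [if_neg (show ¬ 8 ≤ rem.length by omega), ← hrec]
      rfl
    rw [if_neg h8] at hrec
    cases hv : PySem.Int.ofCharsBase? (rem.take 8) 2 with
    | none => rw [hv] at hrec; simp at hrec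
    | some v =>
      simp only [hv] at hrec
      by_cases h88 : (rem.drop 8).length < 8
      · rw [if_pos h88] at hrec; simp at hrec
      rw [if_neg h88] at hrec
      cases hcp : pvCode (rem.drop 8) with
      | none => rw [hcp] at hrec; simp at hrec
      | some sb =>
        obtain ⟨skip, bl⟩ := sb
        simp only [hcp] at hrec
        cases hrest : pvRecords rem.length (rem.drop (8 + skip + bl.toNat)) with
        | none => rw [hrest] at hrec; simp at hrec
        | some rs' =>
          simp only [hrest, Option.some.injEq] at hrec
          have hrest' : pvRecords ((rem.drop (8 + skip + bl.toNat)).length + 1)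
              (rem.drop (8 + skip + bl.toNat)) = some rs' := by
            rw [← pv_records_congr rem.length _ _ (by simp only [List.length_drop]; omega)
              (by omega)]
            exact hrest
          simp only [pvBloop]
          rw [if_pos (show 8 ≤ rem.length by omega)]
          simp only [hv]
          rw [if_neg (show ¬ (rem.drop 8).length < 8 by omega)]
          unfold pvCode at hcp
          cases hl10 : (rem.drop 8)[0]? with
          | none => rw [hl10] at hcp; simp at hcp
          | some c0 =>
            simp only [hl10] at hcp
            have hgetd : (rem.drop 8).getD 0 ' ' = c0 := by
              rw [List.getD_eq_getElem?_getD, hl10]; rfl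
            by_cases hc0 : c0 = '0'
            · rw [if_pos hc0] at hcp
              cases hbl : PySem.Int.ofCharsBase? ((rem.drop 8).take 8) 2 with
              | none => rw [hbl] at hcp; simp at hcp
              | some bl0 =>
                simp only [hbl] at hcp
                by_cases hblr : bl0 < 0
                · rw [if_pos hblr] at hcp; simp at hcp
                rw [if_neg hblr] at hcp
                simp only [Option.some.injEq, Prod.mk.injEq] at hcp
                obtain ⟨hsk, hbl0⟩ := hcp
                rw [hgetd, if_pos hc0]
                dsimp only
                rw [PySem.List.slice_from _ (by omega), PySem.List.slice_to _ (by omega)]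
                have hih : ∀ t, pvBloop f (((rem.drop 8).drop 8).drop bl0.toNat) t =
                    rs'.foldl pvIns t := by
                  intro t
                  exact ih _ t rs' (by simp only [List.length_drop]; omega)
                    (by rw [pv_dd, pv_dd, show 8 + (8 + bl0.toNat) = 8 + skip + bl.toNat by omega]
                        exact hrest')
                rw [hih]
                rw [← hrec]
                simp only [List.foldl_cons, pvIns]
                rw [pv_dd rem 8 8, show (8 : Nat) + skip = 8 + 8 by omega,
                  show bl.toNat = bl0.toNat by omega]
            · rw [if_neg hc0] at hcp
              obtain ⟨a, n, hW, hsk16, hn, hn0, hn8, hblp, hbl0⟩ :=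
                pv_lb_hdr ((rem.drop 8).length + 1) ((rem.drop 8).length + 1) (rem.drop 8) []
                  skip bl (by omega) (by omega) hcp
              rw [hgetd, if_neg hc0]
              simp only [hW]
              rw [pv_seg _ 8 16 8 8 (by norm_num) (by norm_num)]
              simp only [hn]
              rw [pv_seg _ (8 - n) 8 (8 - n.toNat) n.toNat (by omega) (by omega)]
              simp only [hblp]
              rw [PySem.List.slice_from _ (by omega), PySem.List.slice_to _ (by omega)]
              have hih : ∀ t, pvBloop f ((((rem.drop 8).drop (skip - 16)).drop 16).drop bl.toNat) t =
                  rs'.foldl pvIns t := by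
                intro t
                exact ih _ t rs' (by simp only [List.length_drop]; omega)
                  (by rw [pv_dd, pv_dd, pv_dd,
                        show 8 + (skip - 16 + (16 + bl.toNat)) = 8 + skip + bl.toNat by omega]
                      exact hrest')
              rw [hih]
              rw [← hrec]
              simp only [List.foldl_cons, pvIns]
              rw [pv_dd rem 8 (skip - 16), pv_dd rem (8 + (skip - 16)) 16,
                show 8 + (skip - 16) + 16 = 8 + skip by omega]

theorem pv_lval :
    ∀ (fuel : Nat) (l : List Char) (rs : List (List Char × List Char × Int)),
      pvRecords fuel l = some rs →
      ∀ r ∈ rs, PySem.Int.ofCharsBase? r.1 2 = some r.2.2 := by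
  intro fuel
  induction fuel with
  | zero => intro l rs h; simp [pvRecords] at h
  | succ f ih =>
    intro l rs hrec
    simp only [pvRecords] at hrec
    by_cases h8 : l.length < 8
    · rw [if_pos h8] at hrec
      simp only [Option.some.injEq] at hrec
      rw [← hrec]; simp
    rw [if_neg h8] at hrec
    cases hv : PySem.Int.ofCharsBase? (l.take 8) 2 with
    | none => rw [hv] at hrec; simp at hrec
    | some v =>
      simp only [hv] at hrec
      by_cases h88 : (l.drop 8).length < 8
      · rw [if_pos h88] at hrec; simp at hrec
      rw [if_neg h88] at hrec
      cases hcp : pvCode (l.drop 8) with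
      | none => rw [hcp] at hrec; simp at hrec
      | some sb =>
        obtain ⟨skip, bl⟩ := sb
        simp only [hcp] at hrec
        cases hrest : pvRecords f (l.drop (8 + skip + bl.toNat)) with
        | none => rw [hrest] at hrec; simp at hrec
        | some rs' =>
          simp only [hrest, Option.some.injEq] at hrec
          intro r hr
          rw [← hrec] at hr
          rcases List.mem_cons.mp hr with h | h
          · rw [h]; exact hv
          · exact ih _ _ hrest r h

theorem pv_lc :
    ∀ (rs : List (List Char × List Char × Int)) (d0 : List (List Char))
      (fuel : Nat) (table : PySem.Dict String Int),
      (d0 ++ pvFlat rs).length - d0.length < fuel →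
      (∀ r ∈ rs, PySem.Int.ofCharsBase? r.1 2 = some r.2.2) →
      pvAconv (d0 ++ pvFlat rs) fuel d0.length table = some (rs.foldl pvIns table) := by
  intro rs
  induction rs with
  | nil =>
    intro d0 fuel table hf hv
    obtain _ | f := fuel
    · omega
    simp only [pvFlat, List.flatMap_nil, List.append_nil, pvAconv, List.foldl_nil]
    rw [if_neg (by omega)]
  | cons r rs' ih =>
    intro d0 fuel table hf hv
    have hflat : pvFlat (r :: rs') = r.1 :: r.2.1 :: pvFlat rs' := rfl
    rw [hflat] at hf ⊢
    obtain _ | f := fuel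
    · simp only [List.length_append, List.length_cons] at hf; omega
    simp only [pvAconv]
    rw [if_pos (by simp only [List.length_append, List.length_cons]; omega)]
    rw [List.getElem?_append_right (by omega), show d0.length + 1 - d0.length = 1 by omega]
    simp only [List.getElem?_cons_succ, List.getElem?_cons_zero]
    rw [List.getD_eq_getElem?_getD, List.getElem?_append_right (by omega),
      Nat.sub_self, List.getElem?_cons_zero]
    simp only [Option.getD_some]
    simp only [hv r (List.mem_cons_self ..)]
    rw [show table.insert (String.ofList r.2.1) r.2.2 = pvIns table r from rfl]
    have hre : d0 ++ r.1 :: r.2.1 :: pvFlat rs' = (d0 ++ [r.1, r.2.1]) ++ pvFlat rs' := by simp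
    have hln : d0.length + 2 = (d0 ++ [r.1, r.2.1]).length := by simp
    rw [hre, hln, ih (d0 ++ [r.1, r.2.1]) f (pvIns table r)
      (by simp only [List.length_append, List.length_cons] at hf ⊢; omega)
      (fun r hr => hv r (List.mem_cons_of_mem _ hr))]
    rfl

-- ===== VERDICT (by name: the statement is the Claim_ definition above) =====
theorem shichiro_decode_spec : Claim_equal_shichiro_decode := by
  intro byts _hDom hPre
  unfold Pre_shichiro_decode at hPre
  unfold Spec_shichiro_decode shichiro_decode shichiro_decode_alt
  obtain ⟨rs, hrs⟩ := Option.isSome_iff_exists.mp hPre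
  have hbits0 : ((byts.map String.toList).flatten).drop 0 = (byts.map String.toList).flatten := by simp
  have hA := pv_la ((byts.map String.toList).flatten) (((byts.map String.toList).flatten).length + 1) 0 0 [] rs
    (by omega) (by decide) (by rw [hbits0]; exact hrs)
  have hB := pv_lb (((byts.map String.toList).flatten).length + 1) ((byts.map String.toList).flatten)
    PySem.Dict.empty rs (by omega) hrs
  have hval := pv_lval _ _ _ hrs
  have hC := pv_lc rs [] ((pvFlat rs).length + 1) PySem.Dict.empty (by simp) hval
  simp only [List.nil_append, List.length_nil] at hA hC
  simp only [hA, hB, hC]
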